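-- pv_equiv track=rewrite | github.com/cicl-iscl/SigMorph2022-Inflection-Task | submission_leander/src/paradigm.py | split_particles
-- ===== SOURCE A (Python) =====
-- def split_particles(form):
--     # Split form into multiple subforms that are separated
--     # by nonalphanumeric chars
--     subforms = []
--
--     current_subform = []
--     for char in form:
--         if not char.isalnum():
--             current_subform = "".join(current_subform)
--
--             if current_subform:
--                 subforms.append(current_subform)
--
--             current_subform = []
--
--         current_subform.append(char)
--
--     subforms.append("".join(current_subform))
--
--     return subforms
-- ===== SOURCE B (Python) =====
-- def split_particles(form):
--     # Scan-free-of-buffers rewrite: find the leading alphanumeric run, then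
--     # emit one chunk per separator (the separator plus its following run).
--     n = len(form)
--     i = 0
--     while i < n and form[i].isalnum():
--         i += 1
--     parts = [form[:i]] if i > 0 else []
--     while i < n:
--         j = i + 1
--         while j < n and form[j].isalnum():
--             j += 1
--         parts.append(form[i:j])
--         i = j
--     return parts if parts else [""]
-- ===== Notes on version B (the rewrite author's own statement) =====
-- stated objective: alternative
-- what changed: B replaces A's per-character buffer accumulation with index/run scanning: it finds the leading alphanumeric run, then emits one chunk per separator (the separator plus its following alphanumeric run) via string slicing.
import Mathlib
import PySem

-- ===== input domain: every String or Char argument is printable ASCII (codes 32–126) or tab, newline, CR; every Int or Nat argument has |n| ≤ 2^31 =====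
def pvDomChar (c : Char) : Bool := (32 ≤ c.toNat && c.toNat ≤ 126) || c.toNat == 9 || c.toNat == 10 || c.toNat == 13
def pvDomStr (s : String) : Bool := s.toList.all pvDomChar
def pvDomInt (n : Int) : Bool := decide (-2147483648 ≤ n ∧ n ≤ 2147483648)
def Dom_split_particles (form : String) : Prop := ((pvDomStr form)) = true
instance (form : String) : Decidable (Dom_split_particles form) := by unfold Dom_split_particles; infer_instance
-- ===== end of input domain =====

-- B replaces A's per-character buffer accumulation with run scanning (leading alnum run,
-- then one chunk per separator char plus its following alnum run): an alternative decomposition.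


-- ===== PORT A =====
-- state: (subforms so far, current buffer of chars)
def stepA (st : List String × List Char) (c : Char) : List String × List Char :=
  if ¬ PySem.Chars.isalnum c then
    let s := String.ofList st.2              -- "".join(current_subform)
    let subs := if s ≠ "" then st.1 ++ [s] else st.1
    (subs, [c])
  else (st.1, st.2 ++ [c])

def split_particles (form : String) : List String :=
  let st := form.toList.foldl stepA ([], [])
  st.1 ++ [String.ofList st.2]

-- ===== PORT B =====
-- `while i < n and form[i].isalnum(): i += 1` plus the slice, as list recursion:
-- returns (the alnum run, the rest)
def altRun : List Char → List Char × List Char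
  | [] => ([], [])
  | c :: r =>
    if PySem.Chars.isalnum c then
      let p := altRun r
      (c :: p.1, p.2)
    else ([], c :: r)

theorem altRun_snd_length : ∀ l : List Char, (altRun l).2.length ≤ l.length := by
  intro l
  induction l with
  | nil => simp [altRun]
  | cons c r ih =>
    simp only [altRun]
    split
    · exact le_trans ih (Nat.le_succ _)
    · simp

-- the `while i < n:` loop: each chunk is the separator at the front plus its alnum run
def altChunks : List Char → List String
  | [] => []
  | c :: r =>
    let p := altRun r
    String.ofList (c :: p.1) :: altChunks p.2
  termination_by l => l.length
  decreasing_by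
    simpa using Nat.lt_succ_of_le (altRun_snd_length r)

def split_particles_alt (form : String) : List String :=
  let p := altRun form.toList
  let parts := (if p.1 ≠ [] then [String.ofList p.1] else []) ++ altChunks p.2
  if parts ≠ [] then parts else [""]

-- ===== PRECONDITION & SPEC =====
def Spec_split_particles (form : String) (out : List String) : Prop := out = split_particles_alt form
instance (form : String) (out : List String) : Decidable (Spec_split_particles form out) := by unfold Spec_split_particles; infer_instance

-- ===== CLAIM (what is proved, stated in full; the proofs are below) =====
def Claim_equal_split_particles : Prop := ∀ (form : String), Dom_split_particles form → Spec_split_particles form (split_particles form)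

-- ===== LEMMAS AND PROOFS =====

-- A's remaining output when the buffer is `cur` and the unread input is `l`
def restA (cur : List Char) : List Char → List String
  | [] => [String.ofList cur]
  | c :: t =>
    if PySem.Chars.isalnum c then restA (cur ++ [c]) t
    else (if cur ≠ [] then [String.ofList cur] else []) ++ restA [c] t

theorem foldA_eq_restA (l : List Char) : ∀ (subs : List String) (cur : List Char),
    (let st := l.foldl stepA (subs, cur); st.1 ++ [String.ofList st.2]) = subs ++ restA cur l := by
  induction l with
  | nil => intro subs cur; simp [restA]
  | cons c t ih =>
    intro subs cur
    by_cases h : PySem.Chars.isalnum c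
    · simpa [stepA, h, restA] using ih subs (cur ++ [c])
    · by_cases hc : cur = []
      · simpa [stepA, h, hc, restA] using ih subs [c]
      · have hs : String.ofList cur ≠ "" := by
          simpa [← String.toList_inj] using hc
        simpa [stepA, h, hc, hs, restA, List.append_assoc] using ih (subs ++ [String.ofList cur]) [c]

theorem restA_eq (l : List Char) : ∀ cur : List Char,
    restA cur l =
      if (altRun l).2 = [] then [String.ofList (cur ++ (altRun l).1)]
      else (if cur ++ (altRun l).1 ≠ [] then [String.ofList (cur ++ (altRun l).1)] else [])
            ++ altChunks (altRun l).2 := by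
  induction l with
  | nil => intro cur; simp [restA, altRun]
  | cons c t ih =>
    intro cur
    by_cases h : PySem.Chars.isalnum c
    · simpa [restA, altRun, h, List.append_assoc] using ih (cur ++ [c])
    · have ht := ih [c]
      simp only [restA, altRun, h, Bool.false_eq_true, ite_false]
      rw [ht]
      rcases ht2 : (altRun t).2 with _ | ⟨d, r⟩
      · simp [altChunks, ht2]
      · simp [altChunks, ht2]

theorem split_particles_eq_alt (form : String) :
    split_particles form = split_particles_alt form := by
  unfold split_particles split_particles_alt
  rw [foldA_eq_restA form.toList [] [], restA_eq]
  rcases h2 : (altRun form.toList).2 with _ | ⟨d, r⟩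
  · rcases h1 : (altRun form.toList).1 with _ | ⟨c, p⟩
    · simp [h1, h2, altChunks]
    · simp [h1, h2, altChunks]
  · rcases h1 : (altRun form.toList).1 with _ | ⟨c, p⟩
    · simp [h1, h2, altChunks]
    · simp [h1, h2, altChunks]

-- ===== VERDICT (by name: the statement is the Claim_ definition above) =====
theorem split_particles_spec : Claim_equal_split_particles := by
  intro form _
  exact split_particles_eq_alt form
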